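-- pv_equiv track=rewrite | github.com/Toughie17/Algorithms | 프로그래머스/unrated/181858. 무작위로 K개의 수 뽑기/무작위로 K개의 수 뽑기.py | solution
-- ===== SOURCE A (Python) =====
-- def solution(arr, k):
--     answer = []
--
-- #     for num in arr:
-- #         if num not in answer:
-- #             answer.append(num)
--
-- #     if len(answer) > k:
-- #         return answer[:k]
-- #     else:
-- #         answer.extend([-1] * (k - len(answer)))
-- #         return answer
--
--     for num in arr:
--         if num not in answer:
--             answer.append(num)
--         if len(answer) == k:
--             break
--
--     answer.extend([-1] * (k - len(answer)))
--     return answer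
-- ===== SOURCE B (Python) =====
-- def solution(arr, k):
--     answer = []
--     while k > 0 and arr:
--         head = arr[0]
--         answer.append(head)
--         arr = [x for x in arr[1:] if x != head]
--         k -= 1
--     return answer + [-1] * max(k, 0)
-- ===== Notes on version B (the rewrite author's own statement) =====
-- stated objective: alternative
-- what changed: Replaces A's accumulating loop (append-if-unseen membership test, break at k) by a loop with no seen-collection at all: each round takes the head, appends it to the answer, deletes every occurrence of it from the remaining list and decrements k, so chosen values are distinct by construction; padding uses the leftover k.
-- intended difference: For k = 0 with a nonempty arr, A returns the full deduplicated list (its break test len==k can never fire after the first append) while B returns the empty list, the intended answer when zero numbers are to be picked. — e.g. on solution([1], 0): A returns [1], B returns []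
-- outside the precondition, e.g. on solution([1, 2, 3], -1): A returns [1, 2, 3], B returns []
import Mathlib
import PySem

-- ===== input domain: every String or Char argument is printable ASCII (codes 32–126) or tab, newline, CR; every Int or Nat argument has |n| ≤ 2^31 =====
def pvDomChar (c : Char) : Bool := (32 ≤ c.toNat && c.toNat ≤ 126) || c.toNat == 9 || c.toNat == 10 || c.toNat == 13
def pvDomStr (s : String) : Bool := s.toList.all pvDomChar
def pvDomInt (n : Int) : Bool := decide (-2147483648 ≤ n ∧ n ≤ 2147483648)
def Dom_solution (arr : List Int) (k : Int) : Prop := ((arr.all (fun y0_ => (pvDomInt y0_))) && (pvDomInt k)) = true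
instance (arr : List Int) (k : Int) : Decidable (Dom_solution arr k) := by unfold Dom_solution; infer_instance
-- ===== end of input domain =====

-- B keeps no seen-collection: each round it takes the head, deletes every occurrence of it from
-- the rest and decrements k, so chosen values are distinct by construction; replaces A's
-- accumulate-with-membership-test-and-break loop (objective: alternative).

-- ===== PORT A =====
-- the for-loop with its break, state = answer
def solutionLoopA (k : Int) : List Int → List Int → List Int
  | [], answer => answer
  | num :: rest, answer =>
    let a2 := if answer.contains num then answer else answer ++ [num]
    if (a2.length : Int) = k then a2 else solutionLoopA k rest a2

def solution (arr : List Int) (k : Int) : List Int :=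
  let answer := solutionLoopA k arr []
  answer ++ List.replicate (k - (answer.length : Int)).toNat (-1)

-- ===== PORT B =====
-- the while loop, state = (arr, k, answer); fuel = arr.length bounds the iterations
-- (each round strictly shortens arr, and with arr empty the loop exits)
def solutionAltGo : Nat → List Int → Int → List Int → List Int
  | 0, _, k, answer => answer ++ List.replicate k.toNat (-1)
  | fuel + 1, arr, k, answer =>
    if k ≤ 0 then answer ++ List.replicate k.toNat (-1)
    else match arr with
      | [] => answer ++ List.replicate k.toNat (-1)
      | head :: rest => solutionAltGo fuel (rest.filter (· != head)) (k - 1) (answer ++ [head])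

def solution_alt (arr : List Int) (k : Int) : List Int :=
  solutionAltGo arr.length arr k []

-- ===== PRECONDITION & SPEC =====
-- Pre_ excludes negative k (outside the problem's domain), where A's return of the whole
-- deduplicated list and B's empty result are both accidental and neither is specified.
def Pre_solution (arr : List Int) (k : Int) : Prop := 0 ≤ k
instance (arr : List Int) (k : Int) : Decidable (Pre_solution arr k) := by unfold Pre_solution; infer_instance

def pvWitness_solution : List Int × Int := ([1, 2, 2, 3], 2)

-- For k = 0 with nonempty arr, A returns the full deduplicated list (its break test len==k can
-- never fire after the first append) while B returns [], the intended answer for picking zero numbers.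
def D_solution (arr : List Int) (k : Int) : Prop := k = 0 ∧ arr ≠ []
instance (arr : List Int) (k : Int) : Decidable (D_solution arr k) := by unfold D_solution; infer_instance

def Spec_solution (arr : List Int) (k : Int) (out : List Int) : Prop :=
  ¬ D_solution arr k → out = solution_alt arr k
instance (arr : List Int) (k : Int) (out : List Int) : Decidable (Spec_solution arr k out) := by unfold Spec_solution; infer_instance

def pvDiffWitness_solution : List Int × Int := ([1], 0)
def pvDiffWitnessOut_solution : (List Int) × (List Int) := ([1], [])

-- ===== CLAIM (what is proved, stated in full; the proofs are below) =====
def Claim_unchanged_solution : Prop := ∀ (arr : List Int) (k : Int), Dom_solution arr k → Pre_solution arr k → Spec_solution arr k (solution arr k)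
def Claim_changed_solution : Prop := Dom_solution (pvDiffWitness_solution.1) (pvDiffWitness_solution.2) ∧ Pre_solution (pvDiffWitness_solution.1) (pvDiffWitness_solution.2) ∧ D_solution (pvDiffWitness_solution.1) (pvDiffWitness_solution.2) ∧ solution (pvDiffWitness_solution.1) (pvDiffWitness_solution.2) = pvDiffWitnessOut_solution.1 ∧ solution_alt (pvDiffWitness_solution.1) (pvDiffWitness_solution.2) = pvDiffWitnessOut_solution.2 ∧ pvDiffWitnessOut_solution.1 ≠ pvDiffWitnessOut_solution.2
def Claim_exact_solution : Prop := ∀ (arr : List Int) (k : Int), Dom_solution arr k → Pre_solution arr k → D_solution arr k → solution arr k ≠ solution_alt arr k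

-- ===== LEMMAS AND PROOFS =====

-- the loop's step is exactly Set.add
lemma step_eq_add (answer : List Int) (num : Int) :
    (if answer.contains num then answer else answer ++ [num]) = PySem.Set.add answer num := by
  simp [PySem.Set.add, PySem.Set.contains]

lemma foldl_add_prefix (l : List Int) (s : PySem.Set Int) :
    ∃ t, l.foldl PySem.Set.add s = s ++ t := by
  induction l generalizing s with
  | nil => exact ⟨[], by simp⟩
  | cons x rest ih =>
    obtain ⟨t, ht⟩ := ih (PySem.Set.add s x)
    by_cases hx : x ∈ s
    · rw [PySem.Set.add_of_mem hx] at ht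
      exact ⟨t, by rw [List.foldl_cons, PySem.Set.add_of_mem hx]; exact ht⟩
    · rw [PySem.Set.add_of_not_mem hx] at ht
      refine ⟨x :: t, ?_⟩
      rw [List.foldl_cons, PySem.Set.add_of_not_mem hx, ht]; simp

lemma loopA_eq_take (k : Int) (arr : List Int) :
    ∀ acc : List Int, (acc.length : Int) < k →
      solutionLoopA k arr acc = (arr.foldl PySem.Set.add acc).take k.toNat := by
  induction arr with
  | nil =>
    intro acc hlt
    have : acc.length ≤ k.toNat := by omega
    simp [solutionLoopA, List.take_of_length_le this]
  | cons x rest ih =>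
    intro acc hlt
    have hstep := step_eq_add acc x
    set a2 := if acc.contains x then acc else acc ++ [x] with ha2
    have hlen : a2.length = acc.length ∨ a2.length = acc.length + 1 := by
      by_cases hx : x ∈ acc <;> simp [ha2, hx]
    by_cases hbreak : (a2.length : Int) = k
    · obtain ⟨t, ht⟩ := foldl_add_prefix rest (PySem.Set.add acc x)
      rw [← hstep] at ht
      have hk : a2.length = k.toNat := by omega
      simp only [solutionLoopA, ← ha2, if_pos hbreak, List.foldl_cons, ← hstep, ht]
      rw [List.take_left' hk]
    · have hlt2 : (a2.length : Int) < k := by omega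
      simp only [solutionLoopA, ← ha2, if_neg hbreak, List.foldl_cons, ← hstep]
      exact ih a2 hlt2

lemma loopA_zero_ne_nil (arr : List Int) :
    ∀ acc : List Int, acc ≠ [] ∨ arr ≠ [] → solutionLoopA 0 arr acc ≠ [] := by
  induction arr with
  | nil =>
    intro acc h
    simpa [solutionLoopA] using h.resolve_right (by simp)
  | cons x rest ih =>
    intro acc _
    set a2 := if acc.contains x then acc else acc ++ [x] with ha2
    have hne : a2 ≠ [] := by
      by_cases hx : x ∈ acc
      · have : acc ≠ [] := by rintro rfl; simp at hx
        simpa [ha2, hx] using this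
      · simp [ha2, hx]
    have hlen : ((a2.length : Int) = 0) = False := by
      simp only [eq_iff_iff, iff_false]
      intro h0
      exact hne (List.eq_nil_of_length_eq_zero (by omega))
    simp only [solutionLoopA, ← ha2, hlen, if_false]
    exact ih a2 (Or.inl hne)

-- adding elements of l to a set already containing a: filtering out a changes nothing
lemma foldl_add_filter_ne (l : List Int) (s : PySem.Set Int) (a : Int) (ha : a ∈ s) :
    l.foldl PySem.Set.add s = (l.filter (· != a)).foldl PySem.Set.add s := by
  induction l generalizing s with
  | nil => rfl
  | cons x rest ih =>
    by_cases hx : x = a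
    · subst hx
      rw [List.foldl_cons, PySem.Set.add_of_mem ha]
      simpa using ih s ha
    · have hmem : a ∈ PySem.Set.add s x := by
        by_cases hxs : x ∈ s
        · rwa [PySem.Set.add_of_mem hxs]
        · rw [PySem.Set.add_of_not_mem hxs]; exact List.mem_append_left _ ha
      have hfil : (x :: rest).filter (· != a) = x :: rest.filter (· != a) := by
        simp [hx]
      rw [hfil, List.foldl_cons, List.foldl_cons]
      exact ih (PySem.Set.add s x) hmem

-- a head absent from l commutes out of the fold
lemma foldl_add_cons_of_not_mem (l : List Int) (a : Int) (s : PySem.Set Int) (ha : a ∉ l) :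
    l.foldl PySem.Set.add (a :: s) = a :: l.foldl PySem.Set.add s := by
  induction l generalizing s with
  | nil => rfl
  | cons x rest ih =>
    have hxa : x ≠ a := by rintro rfl; exact ha (List.mem_cons_self)
    have hstep : PySem.Set.add (a :: s) x = a :: PySem.Set.add s x := by
      by_cases hxs : x ∈ s
      · rw [PySem.Set.add_of_mem hxs, PySem.Set.add_of_mem (by simp [hxs])]
      · rw [PySem.Set.add_of_not_mem hxs,
            PySem.Set.add_of_not_mem (by simp [hxs, hxa]), List.cons_append]
    rw [List.foldl_cons, List.foldl_cons, hstep]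
    exact ih _ (fun h => ha (List.mem_cons_of_mem _ h))

-- dedup peels its head after deleting the head's other occurrences
lemma ofList_cons_filter (a : Int) (rest : List Int) :
    PySem.Set.ofList (a :: rest) = a :: PySem.Set.ofList (rest.filter (· != a)) := by
  have h1 : PySem.Set.ofList (a :: rest) = rest.foldl PySem.Set.add [a] := by
    rw [PySem.Set.ofList_eq_foldl]; rfl
  have hnotmem : a ∉ rest.filter (· != a) := by simp
  rw [h1, foldl_add_filter_ne rest [a] a (by simp),
      show ([a] : List Int) = a :: [] from rfl,
      foldl_add_cons_of_not_mem _ a [] hnotmem, PySem.Set.ofList_eq_foldl]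

-- B computes: answer, then take k of the dedup, then pad with -1
lemma altGo_eq_take_pad (fuel : Nat) :
    ∀ (arr : List Int) (k : Int) (answer : List Int), arr.length ≤ fuel → 0 ≤ k →
    solutionAltGo fuel arr k answer =
      answer ++ (PySem.Set.ofList arr).take k.toNat ++
        List.replicate (k - (((PySem.Set.ofList arr).take k.toNat).length : Int)).toNat (-1) := by
  induction fuel with
  | zero =>
    intro arr k answer hlen hk
    have : arr = [] := List.eq_nil_of_length_eq_zero (by omega)
    subst this
    simp [solutionAltGo, PySem.Set.ofList]
  | succ fuel ih =>
    intro arr k answer hlen hk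
    by_cases hk0 : k ≤ 0
    · have : k = 0 := le_antisymm hk0 hk
      subst this
      simp [solutionAltGo]
    · rcases arr with _ | ⟨a, rest⟩
      · simp [solutionAltGo, hk0, PySem.Set.ofList]
      · have hfl : (rest.filter (· != a)).length ≤ fuel := by
          have hf := List.length_filter_le (· != a) rest
          simp only [List.length_cons] at hlen
          omega
        have hih := ih (rest.filter (· != a)) (k - 1) (answer ++ [a]) hfl (by omega)
        rw [solutionAltGo]
        simp only [hk0, if_false]
        rw [hih, ofList_cons_filter a rest]
        have htoNat : k.toNat = (k - 1).toNat + 1 := by omega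
        rw [htoNat, List.take_succ_cons]
        simp only [List.append_assoc, List.singleton_append, List.cons_append,
          List.nil_append, List.length_cons]
        congr 4
        omega

lemma altGo_of_nonpos (fuel : Nat) (arr : List Int) (k : Int) (answer : List Int) (hk : k ≤ 0) :
    solutionAltGo fuel arr k answer = answer := by
  cases fuel <;> simp [solutionAltGo, hk, Int.toNat_of_nonpos hk]

-- ===== VERDICT (by name: the statement is the Claim_ definition above) =====
theorem solution_spec : Claim_unchanged_solution := by
  intro arr k _ hpre hnd
  unfold Pre_solution at hpre
  unfold D_solution at hnd
  by_cases hk : k = 0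
  · subst hk
    have harr : arr = [] := by
      by_contra h; exact hnd ⟨rfl, h⟩
    subst harr
    decide
  · have hk1 : 0 < k := lt_of_le_of_ne hpre (Ne.symm hk)
    have hmain := loopA_eq_take k arr [] (by simpa using hk1)
    have hofList : arr.foldl PySem.Set.add [] = PySem.Set.ofList arr := by
      rw [PySem.Set.ofList_eq_foldl]
    rw [solution_alt, altGo_eq_take_pad arr.length arr k [] (le_refl _) hpre, List.nil_append]
    simp only [solution, hmain, hofList]

theorem solution_changed : Claim_changed_solution := by
  unfold Claim_changed_solution; decide

theorem solution_tight : Claim_exact_solution := by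
  intro arr k _ _ hd
  obtain ⟨hk, harr⟩ := hd
  subst hk
  have hA : solutionLoopA 0 arr [] ≠ [] := loopA_zero_ne_nil arr [] (Or.inr harr)
  have hBnil : solution_alt arr 0 = [] := altGo_of_nonpos _ _ _ _ (le_refl 0)
  rw [hBnil]
  simp only [solution]
  intro hcontra
  exact hA (List.append_eq_nil_iff.mp hcontra).1
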